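-- pv_equiv track=rewrite | github.com/Tugcga/S-USD | utils.py | get_closest_data
-- ===== SOURCE A (Python) =====
-- def get_closest_data(array, key):
--     ''' for array [(0, a), (2, b), (3, c), (5, d)] and key = 3 return c
--
--      we assume, that array is ordered by the first element in the tuple
--      find closest value by binary search algorithm
--     '''
--     if len(array) == 1:
--         return array[0][1]
--     else:
--         steps = 0
--         start = 0
--         end = len(array) - 1
--         while end - start > 1:
--             middle = (start + end) // 2
--             if array[middle][0] < key:
--                 start = middle
--             else:
--                 end = middle
--             steps += 1
--         if abs(key - array[start][0]) < abs(key - array[end][0]):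
--             return array[start][1]
--         else:
--             return array[end][1]
-- ===== SOURCE B (Python) =====
-- def get_closest_data(array, key):
--     def go(lo, hi):
--         if hi - lo <= 1:
--             if abs(key - array[lo][0]) < abs(key - array[hi][0]):
--                 return array[lo][1]
--             return array[hi][1]
--         mid = (lo + hi) // 2
--         if key <= array[mid][0]:
--             return go(lo, mid)
--         return go(mid, hi)
--     return go(0, len(array) - 1)
-- ===== Notes on version B (the rewrite author's own statement) =====
-- stated objective: simpler
-- what changed: Replaces the imperative while-loop (start/end/steps state, a len==1 special case, and a final bracket comparison at the call site) by a direct recursive bisection go(lo, hi) with the inverted comparison key <= array[mid][0], which returns the chosen value itself from its base case; the special case and the dead steps counter disappear.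
import Mathlib
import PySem

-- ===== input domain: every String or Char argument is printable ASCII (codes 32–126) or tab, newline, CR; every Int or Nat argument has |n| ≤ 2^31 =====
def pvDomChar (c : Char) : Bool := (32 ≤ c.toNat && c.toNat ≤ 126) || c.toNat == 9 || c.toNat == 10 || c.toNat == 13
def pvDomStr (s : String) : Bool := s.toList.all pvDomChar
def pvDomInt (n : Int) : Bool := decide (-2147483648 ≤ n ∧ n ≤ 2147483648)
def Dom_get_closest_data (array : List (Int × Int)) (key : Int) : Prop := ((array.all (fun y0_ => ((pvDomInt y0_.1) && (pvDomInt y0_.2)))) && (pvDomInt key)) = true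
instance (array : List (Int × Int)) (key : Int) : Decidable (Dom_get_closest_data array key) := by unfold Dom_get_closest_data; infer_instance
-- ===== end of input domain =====

-- B replaces A's while-loop bisection (bracket pair + len==1 special case + caller-side comparison) by one direct recursion returning the value; simpler, equal on every nonempty array.


-- ===== PORT A =====
-- A's while loop 'while end - start > 1: …'; 'steps' is threaded exactly as in A (it is never read).
-- array[middle] is ported as (pyGet? …).getD (0,0): on the nonempty arrays Pre_ admits, every index
-- A probes is in range, so the default is never taken there.
def pvLoopA (array : List (Int × Int)) (key : Int) (start end_ steps : Int) : Int × Int :=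
  if h : end_ - start > 1 then
    let middle := PySem.Int.floordiv (start + end_) 2
    if ((PySem.List.pyGet? array middle).getD (0, 0)).1 < key then
      pvLoopA array key middle end_ (steps + 1)
    else
      pvLoopA array key start middle (steps + 1)
  else (start, end_)
termination_by (end_ - start).toNat
decreasing_by
  all_goals
    have hm : PySem.Int.floordiv (start + end_) 2 = (start + end_) / 2 :=
      PySem.Int.floordiv_eq_ediv_of_pos (by norm_num)
    simp only [hm]; omega

def get_closest_data (array : List (Int × Int)) (key : Int) : Int :=
  if array.length = 1 then ((PySem.List.pyGet? array 0).getD (0, 0)).2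
  else
    let r := pvLoopA array key 0 ((array.length : Int) - 1) 0
    if |key - ((PySem.List.pyGet? array r.1).getD (0, 0)).1| < |key - ((PySem.List.pyGet? array r.2).getD (0, 0)).1| then
      ((PySem.List.pyGet? array r.1).getD (0, 0)).2
    else
      ((PySem.List.pyGet? array r.2).getD (0, 0)).2

-- ===== PORT B =====
-- B's inner 'go(lo, hi)': recursion instead of the loop; the base case compares the bracket and
-- returns the value itself. array[i] is ported with the same (pyGet? …).getD (0,0) totalisation:
-- on nonempty arrays every probed index is in range (on [], where Python raises, nothing is claimed).
def pvGo (array : List (Int × Int)) (key : Int) (lo hi : Int) : Int :=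
  if _h : hi - lo ≤ 1 then
    if |key - ((PySem.List.pyGet? array lo).getD (0, 0)).1| < |key - ((PySem.List.pyGet? array hi).getD (0, 0)).1| then
      ((PySem.List.pyGet? array lo).getD (0, 0)).2
    else
      ((PySem.List.pyGet? array hi).getD (0, 0)).2
  else
    let mid := PySem.Int.floordiv (lo + hi) 2
    if key ≤ ((PySem.List.pyGet? array mid).getD (0, 0)).1 then
      pvGo array key lo mid
    else
      pvGo array key mid hi
termination_by (hi - lo).toNat
decreasing_by
  all_goals
    have hm : PySem.Int.floordiv (lo + hi) 2 = (lo + hi) / 2 :=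
      PySem.Int.floordiv_eq_ediv_of_pos (by norm_num)
    simp only [hm]; omega

def get_closest_data_alt (array : List (Int × Int)) (key : Int) : Int :=
  pvGo array key 0 ((array.length : Int) - 1)

-- ===== PRECONDITION & SPEC =====
-- Pre_ excludes exactly the empty array, on which both A and B raise IndexError.
def Pre_get_closest_data (array : List (Int × Int)) (key : Int) : Prop := array ≠ []
instance (array : List (Int × Int)) (key : Int) : Decidable (Pre_get_closest_data array key) := by
  unfold Pre_get_closest_data; infer_instance

def pvWitness_get_closest_data : (List (Int × Int)) × Int := ([(0, 1), (2, 5), (3, 7), (5, 9)], 3)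

def Spec_get_closest_data (array : List (Int × Int)) (key : Int) (out : Int) : Prop := out = get_closest_data_alt array key
instance (array : List (Int × Int)) (key : Int) (out : Int) : Decidable (Spec_get_closest_data array key out) := by unfold Spec_get_closest_data; infer_instance

-- ===== CLAIM (what is proved, stated in full; the proofs are below) =====
def Claim_equal_get_closest_data : Prop := ∀ (array : List (Int × Int)) (key : Int), Dom_get_closest_data array key → Pre_get_closest_data array key → Spec_get_closest_data array key (get_closest_data array key)

-- ===== LEMMAS AND PROOFS =====

-- B's recursion computes exactly A's bracket followed by A's final comparison, for every lo, hi
-- (the two recursions take the same branch at the same midpoints, since key ≤ x ↔ ¬ x < key)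
lemma pvGo_eq_loopA (array : List (Int × Int)) (key : Int) :
    ∀ (lo hi steps : Int),
      pvGo array key lo hi =
        (if |key - ((PySem.List.pyGet? array (pvLoopA array key lo hi steps).1).getD (0, 0)).1| <
            |key - ((PySem.List.pyGet? array (pvLoopA array key lo hi steps).2).getD (0, 0)).1| then
          ((PySem.List.pyGet? array (pvLoopA array key lo hi steps).1).getD (0, 0)).2
        else
          ((PySem.List.pyGet? array (pvLoopA array key lo hi steps).2).getD (0, 0)).2) := by
  intro lo hi
  induction lo, hi using pvGo.induct array key with
  | case1 lo hi h hlt =>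
      intro steps
      rw [pvGo, dif_pos h, if_pos hlt, pvLoopA, dif_neg (by omega), if_pos hlt]
  | case2 lo hi h hge =>
      intro steps
      rw [pvGo, dif_pos h, if_neg hge, pvLoopA, dif_neg (by omega), if_neg hge]
  | case3 lo hi h mid hle ih =>
      intro steps
      rw [pvGo, dif_neg h]
      rw [show PySem.Int.floordiv (lo + hi) 2 = mid from rfl, if_pos hle]
      rw [pvLoopA, dif_pos (by omega)]
      rw [show PySem.Int.floordiv (lo + hi) 2 = mid from rfl, if_neg (not_lt.mpr hle)]
      exact ih (steps + 1)
  | case4 lo hi h mid hgt ih =>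
      intro steps
      rw [pvGo, dif_neg h]
      rw [show PySem.Int.floordiv (lo + hi) 2 = mid from rfl, if_neg hgt]
      rw [pvLoopA, dif_pos (by omega)]
      rw [show PySem.Int.floordiv (lo + hi) 2 = mid from rfl, if_pos (not_le.mp hgt)]
      exact ih (steps + 1)

-- ===== VERDICT (by name: the statement is the Claim_ definition above) =====
theorem get_closest_data_spec : Claim_equal_get_closest_data := by
  intro array key _hdom hne
  show get_closest_data array key = get_closest_data_alt array key
  rw [get_closest_data_alt, pvGo_eq_loopA array key 0 ((array.length : Int) - 1) 0]
  by_cases h1 : array.length = 1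
  · -- A's len == 1 special case: B's recursion lands in its base with lo = hi = 0, picks the same element
    obtain ⟨kv0, rfl⟩ : ∃ kv0, array = [kv0] := by
      cases array with
      | nil => exact absurd rfl hne
      | cons a l => cases l with
        | nil => exact ⟨a, rfl⟩
        | cons b m => simp at h1
    simp [get_closest_data, pvLoopA]
  · simp only [get_closest_data, if_neg h1]
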